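-- pv_equiv track=rewrite | github.com/ErikKarlen/advent-of-code | 2023/day12/python/star2.py | check_possible_arrangement
-- ===== SOURCE A (Python) =====
-- def check_possible_arrangement(arrangement, springs, records):
--     r = ""
--     for i, s in enumerate(springs):
--         if i in arrangement:
--             r += "#"
--         elif s == "?":
--             r += "."
--         else:
--             r += s
--
--     r = r.strip().split(".")
--     l = [len(e) for e in r if len(e) > 0]
--
--     return l == records
-- ===== SOURCE B (Python) =====
-- def check_possible_arrangement(arrangement, springs, records):
--     n = len(springs)
--
--     def damaged(i):
--         return i in arrangement or springs[i] not in '.?'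
--
--     i = 0
--     for rec in records:
--         while i < n and not damaged(i):
--             i += 1
--         if i == n:
--             return False
--         run = 0
--         while i < n and damaged(i):
--             run += 1
--             i += 1
--         if run != rec:
--             return False
--     while i < n and not damaged(i):
--         i += 1
--     return i == n
-- ===== Notes on version B (the rewrite author's own statement) =====
-- stated objective: alternative
-- what changed: B never builds the substituted string or the list of run lengths: it consumes the records one by one with a cursor over the springs (skip separators, count one damaged run, compare, early-exit on first mismatch); Pre_ excludes springs whose first or last character is whitespace, where A's strip() silently discards end cells before measuring runs (spring maps are '#.?' strings, so end whitespace is accidental input).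
-- outside the precondition, e.g. on check_possible_arrangement(set(), ' #', [1]): A returns True, B returns False
import Mathlib
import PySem

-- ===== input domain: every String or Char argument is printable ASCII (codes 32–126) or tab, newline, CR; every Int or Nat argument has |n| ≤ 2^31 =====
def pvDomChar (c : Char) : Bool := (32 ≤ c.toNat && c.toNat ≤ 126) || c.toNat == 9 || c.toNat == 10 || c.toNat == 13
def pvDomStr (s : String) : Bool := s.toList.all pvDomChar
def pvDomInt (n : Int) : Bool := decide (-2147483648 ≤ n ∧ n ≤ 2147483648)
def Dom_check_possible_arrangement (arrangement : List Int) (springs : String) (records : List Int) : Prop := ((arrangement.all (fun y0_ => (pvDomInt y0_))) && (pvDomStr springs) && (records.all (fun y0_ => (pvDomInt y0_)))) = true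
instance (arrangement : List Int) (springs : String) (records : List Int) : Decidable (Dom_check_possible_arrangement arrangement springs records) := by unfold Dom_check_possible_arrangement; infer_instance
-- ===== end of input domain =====

-- B consumes the records with a cursor over the springs (skip separators, count one damaged
-- run, compare, early exit) instead of A's build-string + strip/split/measure pipeline.

-- ===== PORT A =====
-- r = "" ; for i, s in enumerate(springs): … (string built left to right, as a char list)
def check_possible_arrangement (arrangement : List Int) (springs : String) (records : List Int) : Bool :=
  let r : List Char := (PySem.List.enumerate springs.toList).foldl
    (fun r is =>
      if is.1 ∈ arrangement then r ++ ['#']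
      else if is.2 = '?' then r ++ ['.']
      else r ++ [is.2]) []
  let parts := PySem.Chars.splitOn (PySem.Chars.strip r) ['.']
  let l : List Int := (parts.filter (fun e => e.length > 0)).map (fun e => (e.length : Int))
  decide (l = records)

-- ===== PORT B =====
-- damaged(i) = i in arrangement or springs[i] not in '.?'  (on the enumerated cell (i, c))
def pvDamaged (arrangement : List Int) (p : Int × Char) : Bool :=
  decide (p.1 ∈ arrangement) || !(p.2 == '.' || p.2 == '?')

-- the cursor loop of B: for rec in records: skip separators; fail at end; count the run;
-- compare; finally skip separators and require the end of the string
def pvMatch (arrangement : List Int) (recs : List Int) (cells : List (Int × Char)) : Bool :=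
  match recs with
  | [] => (cells.dropWhile (fun p => !pvDamaged arrangement p)).isEmpty
  | r :: rs =>
      let cells' := cells.dropWhile (fun p => !pvDamaged arrangement p)
      if cells'.isEmpty then false
      else
        let run := (cells'.takeWhile (pvDamaged arrangement)).length
        if (run : Int) ≠ r then false
        else pvMatch arrangement rs (cells'.dropWhile (pvDamaged arrangement))

def check_possible_arrangement_alt (arrangement : List Int) (springs : String) (records : List Int) : Bool :=
  pvMatch arrangement records (PySem.List.enumerate springs.toList)

-- ===== PRECONDITION & SPEC =====
-- Pre_ excludes springs whose first or last character is whitespace: there A's strip()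
-- silently discards end-of-string cells before measuring runs, an accident of building
-- and stripping a string (spring maps are '#.?' strings, which never end in whitespace).
def Pre_check_possible_arrangement (arrangement : List Int) (springs : String) (records : List Int) : Prop :=
  (springs.toList.head?.all (fun c => !PySem.Chars.isspace c)
    && springs.toList.getLast?.all (fun c => !PySem.Chars.isspace c)) = true
instance (arrangement : List Int) (springs : String) (records : List Int) : Decidable (Pre_check_possible_arrangement arrangement springs records) := by unfold Pre_check_possible_arrangement; infer_instance

def pvWitness_check_possible_arrangement : List Int × String × List Int := ([0, 3], ".#?#.", [2, 1])

def Spec_check_possible_arrangement (arrangement : List Int) (springs : String) (records : List Int) (out : Bool) : Prop := out = check_possible_arrangement_alt arrangement springs records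
instance (arrangement : List Int) (springs : String) (records : List Int) (out : Bool) : Decidable (Spec_check_possible_arrangement arrangement springs records out) := by unfold Spec_check_possible_arrangement; infer_instance

-- ===== CLAIM (what is proved, stated in full; the proofs are below) =====
def Claim_equal_check_possible_arrangement : Prop := ∀ (arrangement : List Int) (springs : String) (records : List Int), Dom_check_possible_arrangement arrangement springs records → Pre_check_possible_arrangement arrangement springs records → Spec_check_possible_arrangement arrangement springs records (check_possible_arrangement arrangement springs records)

-- ===== LEMMAS AND PROOFS =====

-- replace '?' by '.' (the substitution A performs on non-arranged cells)
def pvQ (c : Char) : Char := if c = '?' then '.' else c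

-- A's substitution, as a function on an enumerated cell
def pvSubst (arrangement : List Int) (is : Int × Char) : Char :=
  if is.1 ∈ arrangement then '#' else pvQ is.2

-- the lengths of the nonempty parts, as A measures them
def pvLens {α : Type} (parts : List (List α)) : List Int :=
  (parts.filter (fun e => e.length > 0)).map (fun e => (e.length : Int))

lemma pvModifyHead_triv {α : Type} (l : List α) : l.modifyHead (fun x => x) = l := by
  cases l <;> simp [List.modifyHead]

-- A's fold builds the substituted string
lemma pvFoldA (arrangement : List Int) (l : List (Int × Char)) (r : List Char) :
    l.foldl (fun r is =>
      if is.1 ∈ arrangement then r ++ ['#']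
      else if is.2 = '?' then r ++ ['.']
      else r ++ [is.2]) r
    = r ++ l.map (pvSubst arrangement) := by
  induction l generalizing r with
  | nil => simp
  | cons x t ih =>
    simp only [List.foldl_cons, List.map_cons, ih, pvSubst, pvQ]
    split_ifs <;> simp_all

-- PySem's fueled split on the single separator '.' is List.splitOnP
lemma pvGoDot (fuel : Nat) (l cur : List Char) (acc : List (List Char)) (h : l.length < fuel) :
    PySem.Chars.splitOn.go ['.'] fuel l cur acc
      = acc.reverse ++ (l.splitOnP (· == '.')).modifyHead (cur.reverse ++ ·) := by
  induction fuel generalizing l cur acc with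
  | zero => omega
  | succ fuel ih =>
    cases l with
    | nil => rw [PySem.Chars.splitOn.go.eq_def]; simp [List.splitOnP_nil]
    | cons c rest =>
      by_cases hc : c = '.'
      · subst hc
        have hp : List.isPrefixOf ['.'] ('.' :: rest) = true := by simp [List.isPrefixOf]
        rw [PySem.Chars.splitOn.go.eq_def]; simp only [if_pos hp]
        simp only [List.length_cons] at h
        rw [ih _ _ _ (by simpa using Nat.lt_of_succ_lt_succ h)]
        simp [List.splitOnP_cons, pvModifyHead_triv]
      · have hp : List.isPrefixOf ['.'] (c :: rest) = false := by
          simp [List.isPrefixOf]; exact fun hh => (hc hh.symm).elim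
        rw [PySem.Chars.splitOn.go.eq_def]; simp only [hp, Bool.false_eq_true, if_false]
        simp only [List.length_cons] at h
        rw [ih _ _ _ (by omega)]
        rw [List.splitOnP_cons, if_neg (by simp [hc])]
        obtain ⟨p, ps, hps⟩ := List.exists_cons_of_ne_nil (List.splitOnP_ne_nil (· == '.') rest)
        simp [hps, List.modifyHead]

lemma pvSplitDot (s : List Char) :
    PySem.Chars.splitOn s ['.'] = s.splitOnP (· == '.') := by
  rw [PySem.Chars.splitOn, pvGoDot _ _ _ _ (by omega)]
  obtain ⟨p, ps, hps⟩ := List.exists_cons_of_ne_nil (List.splitOnP_ne_nil (· == '.') s)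
  simp [hps, List.modifyHead]

-- dropWhile is the identity when the head (if any) fails the predicate
lemma pvDropWhileHead {α : Type} (p : α → Bool) (l : List α)
    (h : ∀ a, l.head? = some a → p a = false) : l.dropWhile p = l := by
  cases l with
  | nil => rfl
  | cons a t => simp [h a rfl]

-- strip is the identity when neither end is whitespace
lemma pvStripId (l : List Char)
    (h1 : l.dropWhile PySem.Chars.isspace = l)
    (h2 : l.reverse.dropWhile PySem.Chars.isspace = l.reverse) :
    PySem.Chars.strip l = l := by
  simp [PySem.Chars.strip, PySem.Chars.lstrip, PySem.Chars.rstrip, h1, h2]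

-- the substituted cell is a separator '.' exactly where B sees a non-damaged cell
lemma pvSubstSep (arrangement : List Int) (x : Int × Char) :
    (pvSubst arrangement x == '.') = !pvDamaged arrangement x := by
  rcases x with ⟨i, c⟩
  by_cases h : i ∈ arrangement
  · simp [pvSubst, pvDamaged, h]
  · by_cases hc : c = '?'
    · simp [pvSubst, pvDamaged, h, pvQ, hc]
    · by_cases hd : c = '.'
      · simp [pvSubst, pvDamaged, h, pvQ, hc, hd]
      · simp [pvSubst, pvDamaged, h, pvQ, hc, hd]

-- the substituted cell is never whitespace when the original character is not
lemma pvSubstNospace (arrangement : List Int) (x : Int × Char)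
    (h : PySem.Chars.isspace x.2 = false) :
    PySem.Chars.isspace (pvSubst arrangement x) = false := by
  rcases x with ⟨i, c⟩
  by_cases hm : i ∈ arrangement
  · simp [pvSubst, hm]; decide
  · by_cases hc : c = '?'
    · simp [pvSubst, pvQ, hm, hc]; decide
    · simpa [pvSubst, pvQ, hm, hc] using h

-- splitting a mapped list, when the separator predicate factors through the map
lemma pvSplitMap {α : Type} (f : α → Char) (q : α → Bool)
    (h : ∀ x, (f x == '.') = q x) (l : List α) :
    (l.map f).splitOnP (· == '.') = (l.splitOnP q).map (List.map f) := by
  induction l with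
  | nil => simp [List.splitOnP_nil]
  | cons a t ih =>
    rw [List.map_cons, List.splitOnP_cons, List.splitOnP_cons, h a]
    by_cases hq : q a = true
    · simp [hq, ih]
    · rw [Bool.not_eq_true] at hq
      rw [hq, ih]
      obtain ⟨p, ps, hps⟩ := List.exists_cons_of_ne_nil (List.splitOnP_ne_nil q t)
      simp [hps, List.modifyHead]

-- pvLens sees only lengths, so it is stable under mapping each part
lemma pvLensMap {α : Type} (f : α → Char) (parts : List (List α)) :
    pvLens (parts.map (List.map f)) = pvLens parts := by
  induction parts with
  | nil => rfl
  | cons p ps ih =>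
    simp only [pvLens, List.map_cons, List.filter_cons, List.length_map] at *
    split_ifs <;> simp_all

-- leading separators only contribute empty parts, which pvLens discards
lemma pvLensDropSep {α : Type} (q : α → Bool) (l : List α) :
    pvLens (l.splitOnP q) = pvLens ((l.dropWhile q).splitOnP q) := by
  induction l with
  | nil => rfl
  | cons a t ih =>
    by_cases hq : q a = true
    · rw [List.splitOnP_cons, if_pos hq, List.dropWhile_cons, hq]
      simpa [pvLens] using ih
    · rw [Bool.not_eq_true] at hq
      rw [List.dropWhile_cons, hq]
      simp

-- a block of non-separators is prepended onto the first part of the split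
lemma pvSplitChunk {α : Type} (q : α → Bool) (run rest : List α)
    (h : ∀ x ∈ run, q x = false) :
    (run ++ rest).splitOnP q = (rest.splitOnP q).modifyHead (run ++ ·) := by
  induction run with
  | nil => simpa using (pvModifyHead_triv (rest.splitOnP q)).symm
  | cons a rs ih =>
    rw [List.cons_append, List.splitOnP_cons, if_neg (by simp [h a (by simp)]),
      ih (fun x hx => h x (by simp [hx]))]
    obtain ⟨p, ps, hps⟩ := List.exists_cons_of_ne_nil (List.splitOnP_ne_nil q rest)
    simp [hps, List.modifyHead]

-- one damaged run at the head contributes exactly its length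
lemma pvLensChunk (arrangement : List Int) (d : Int × Char) (t : List (Int × Char))
    (hd : pvDamaged arrangement d = true) :
    pvLens ((d :: t).splitOnP (fun p => !pvDamaged arrangement p))
      = (((d :: t).takeWhile (pvDamaged arrangement)).length : Int)
        :: pvLens (((d :: t).dropWhile (pvDamaged arrangement)).splitOnP
              (fun p => !pvDamaged arrangement p)) := by
  set q : Int × Char → Bool := fun p => !pvDamaged arrangement p with hqdef
  set l : List (Int × Char) := d :: t with hldef
  have hsplit := List.takeWhile_append_dropWhile (p := pvDamaged arrangement) (l := l)
  have hrun : ∀ x ∈ l.takeWhile (pvDamaged arrangement), q x = false := by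
    intro x hx
    simp [hqdef, List.mem_takeWhile_imp hx]
  have hchunk := pvSplitChunk q (l.takeWhile (pvDamaged arrangement))
      (l.dropWhile (pvDamaged arrangement)) hrun
  rw [hsplit] at hchunk
  have hrunne : l.takeWhile (pvDamaged arrangement) ≠ [] := by
    simp [hldef, hd]
  rw [hchunk]
  cases hrest : l.dropWhile (pvDamaged arrangement) with
  | nil =>
    obtain ⟨a, as, ha⟩ := List.exists_cons_of_ne_nil hrunne
    simp [List.splitOnP_nil, List.modifyHead, pvLens, ha]
  | cons r t' =>
    have hr : pvDamaged arrangement r = false := by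
      have := List.head_dropWhile_not (p := pvDamaged arrangement) (l := l)
        (by rw [hrest]; simp)
      simpa [hrest] using this
    have hq : q r = true := by simp [hqdef, hr]
    rw [List.splitOnP_cons, if_pos hq, List.modifyHead]
    obtain ⟨a, as, ha⟩ := List.exists_cons_of_ne_nil hrunne
    simp [pvLens, ha]

-- B's matcher decides equality with the run-length list of the split
lemma pvMatchEq (arrangement : List Int) (recs : List Int) (l : List (Int × Char)) :
    pvMatch arrangement recs l
      = decide (pvLens (l.splitOnP (fun p => !pvDamaged arrangement p)) = recs) := by
  induction recs generalizing l with
  | nil =>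
    rw [pvMatch, pvLensDropSep]
    cases hl : l.dropWhile (fun p => !pvDamaged arrangement p) with
    | nil => simp [List.splitOnP_nil, pvLens]
    | cons d t =>
      have hd : pvDamaged arrangement d = true := by
        have := List.head_dropWhile_not (p := fun p => !pvDamaged arrangement p) (l := l)
          (by rw [hl]; simp)
        simpa [hl] using this
      rw [pvLensChunk arrangement d t hd]
      simp
  | cons r rs ih =>
    rw [pvMatch, pvLensDropSep]
    simp only []
    cases hl : l.dropWhile (fun p => !pvDamaged arrangement p) with
    | nil => simp [List.splitOnP_nil, pvLens]
    | cons d t =>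
      have hd : pvDamaged arrangement d = true := by
        have := List.head_dropWhile_not (p := fun p => !pvDamaged arrangement p) (l := l)
          (by rw [hl]; simp)
        simpa [hl] using this
      rw [pvLensChunk arrangement d t hd, ih]
      simp only [List.isEmpty_cons, Bool.false_eq_true, if_false]
      by_cases hr : (((d :: t).takeWhile (pvDamaged arrangement)).length : Int) = r
      · simp [hr]
      · simp [hr]

-- ===== VERDICT (by name: the statement is the Claim_ definition above) =====
theorem check_possible_arrangement_spec : Claim_equal_check_possible_arrangement := by
  intro arrangement springs records _ hpre
  unfold Pre_check_possible_arrangement at hpre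
  rw [Bool.and_eq_true] at hpre
  unfold Spec_check_possible_arrangement
  unfold check_possible_arrangement check_possible_arrangement_alt
  simp only [pvFoldA, List.nil_append]
  set l : List Char := springs.toList with hldef
  set u : List Char := (PySem.List.enumerate l).map (pvSubst arrangement) with hudef
  -- neither end of the substituted string is whitespace, so strip is the identity
  have hhead : ∀ a, u.head? = some a → PySem.Chars.isspace a = false := by
    intro a ha
    cases hl : l with
    | nil => rw [hudef, hl] at ha; simp [PySem.List.enumerate] at ha
    | cons c t =>
      rw [hudef, hl, PySem.List.enumerate_cons, List.map_cons, List.head?_cons,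
        Option.some_inj] at ha
      have hc : PySem.Chars.isspace c = false := by
        have := hpre.1; rw [hl] at this; simpa using this
      rw [← ha]; exact pvSubstNospace arrangement (0, c) hc
  have hlast : ∀ a, u.reverse.head? = some a → PySem.Chars.isspace a = false := by
    intro a ha
    rw [List.head?_reverse, hudef, List.getLast?_map] at ha
    rw [Option.map_eq_some_iff] at ha
    obtain ⟨x, hx, hax⟩ := ha
    have hxl : x.2 ∈ l.getLast? := by
      have h1 : (PySem.List.enumerate l).getLast? = (PySem.List.enumerate l)[(PySem.List.enumerate l).length - 1]? := List.getLast?_eq_getElem?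
      rw [h1, PySem.List.length_enumerate, PySem.List.getElem?_enumerate] at hx
      rw [Option.map_eq_some_iff] at hx
      obtain ⟨c, hc, hcx⟩ := hx
      rw [List.getLast?_eq_getElem?, hc]
      simp [← hcx]
    have hc : PySem.Chars.isspace x.2 = false := by
      have := hpre.2
      cases hg : l.getLast? with
      | none => rw [hg] at hxl; simp at hxl
      | some c =>
        rw [hg] at hxl this
        simp only [Option.mem_some_iff] at hxl
        rw [← hxl]; simpa using this
    rw [← hax]; exact pvSubstNospace arrangement x hc
  have hstrip : PySem.Chars.strip u = u :=
    pvStripId u (pvDropWhileHead _ u hhead) (pvDropWhileHead _ u.reverse hlast)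
  rw [hstrip, pvSplitDot, pvSplitMap (pvSubst arrangement) _ (pvSubstSep arrangement)]
  have hL : ∀ parts : List (List Char),
      (parts.filter (fun e => e.length > 0)).map (fun e => (e.length : Int)) = pvLens parts :=
    fun _ => rfl
  rw [hL, pvLensMap, ← pvMatchEq]
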